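-- pv_equiv track=rewrite | github.com/p-lod/PALP-Workspace | app.py | getTermForSyn
-- ===== SOURCE A (Python) =====
-- def getTermForSyn(syn, terms):
--     for key in terms:
--         syns = terms[key]['synonyms']
--         if syns != "":
--             if "," in syns:
--                 for synonym in syns.split(","):
--                     if synonym == syn:
--                         return key
--             else:
--                 if syns == syn:
--                     return key
--     return "term not found"
-- ===== SOURCE B (Python) =====
-- def getTermForSyn(syn, terms):
--     index = {}
--     for key in terms:
--         syns = terms[key]['synonyms']
--         if syns != "":
--             for synonym in syns.split(","):
--                 index.setdefault(synonym, key)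
--     return index.get(syn, "term not found")
-- ===== Notes on version B (the rewrite author's own statement) =====
-- stated objective: alternative
-- what changed: Replaces A's scan-with-early-return (and its separate comma/no-comma branches) by a build-then-lookup structure: one pass builds an inverted synonym->key index with setdefault (first term wins), then a single dict lookup answers the query.
import Mathlib
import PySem

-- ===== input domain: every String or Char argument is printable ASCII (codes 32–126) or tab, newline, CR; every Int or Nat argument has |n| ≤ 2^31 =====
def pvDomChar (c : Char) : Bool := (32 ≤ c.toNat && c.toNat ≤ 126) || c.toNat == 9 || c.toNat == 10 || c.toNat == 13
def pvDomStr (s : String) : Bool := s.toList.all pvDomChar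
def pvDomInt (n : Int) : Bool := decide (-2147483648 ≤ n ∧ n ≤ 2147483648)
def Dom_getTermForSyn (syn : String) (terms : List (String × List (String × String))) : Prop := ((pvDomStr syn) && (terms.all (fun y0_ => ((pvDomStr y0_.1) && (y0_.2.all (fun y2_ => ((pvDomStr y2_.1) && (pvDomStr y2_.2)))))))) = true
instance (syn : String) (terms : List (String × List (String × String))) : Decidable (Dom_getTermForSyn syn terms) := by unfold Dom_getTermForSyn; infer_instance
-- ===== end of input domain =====

-- B replaces A's scan-with-early-return by building an inverted synonym->key index once
-- (setdefault: first term wins) and doing a single lookup: a different decomposition, same cost.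


-- ===== PORT A =====
-- terms[key]['synonyms'] is ported as getD … "": inside Pre_ (key present) it is exactly
-- Python's lookup; where Python would raise KeyError the input is excluded by Pre_ below.
def getTermForSyn (syn : String) (terms : List (String × List (String × String))) : String :=
  match terms with
  | [] => "term not found"
  | (key, d) :: rest =>
    let syns := (PySem.Dict.mk d).getD "synonyms" ""
    if syns ≠ "" then
      if PySem.Str.isIn "," syns then
        -- 'for synonym in syns.split(","): if synonym == syn: return key'
        if ((PySem.Str.split? syns ",").getD []).contains syn then key
        else getTermForSyn syn rest
      else
        if syns == syn then key else getTermForSyn syn rest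
    else getTermForSyn syn rest

-- ===== PORT B =====
-- first pass of Source B: build the inverted index with setdefault (first writer wins)
def pvIndex (terms : List (String × List (String × String))) : PySem.Dict String String :=
  terms.foldl
    (fun idx kd =>
      let syns := (PySem.Dict.mk kd.2).getD "synonyms" ""
      if syns ≠ "" then
        ((PySem.Str.split? syns ",").getD []).foldl (fun i s => i.setdefault s kd.1) idx
      else idx)
    PySem.Dict.empty

def getTermForSyn_alt (syn : String) (terms : List (String × List (String × String))) : String :=
  (pvIndex terms).getD syn "term not found"

-- ===== PRECONDITION & SPEC =====
-- Pre_ excludes exactly the inputs where some term's dict lacks the 'synonyms' key, on which Python A raises KeyError.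
def Pre_getTermForSyn (syn : String) (terms : List (String × List (String × String))) : Prop :=
  terms.all (fun p => (PySem.Dict.mk p.2).contains "synonyms") = true
instance (syn : String) (terms : List (String × List (String × String))) : Decidable (Pre_getTermForSyn syn terms) := by unfold Pre_getTermForSyn; infer_instance
def pvWitness_getTermForSyn : String × (List (String × List (String × String))) :=
  ("b", [("t1", [("synonyms", "a,b")]), ("t2", [("synonyms", "")])])

def Spec_getTermForSyn (syn : String) (terms : List (String × List (String × String))) (out : String) : Prop := out = getTermForSyn_alt syn terms
instance (syn : String) (terms : List (String × List (String × String))) (out : String) : Decidable (Spec_getTermForSyn syn terms out) := by unfold Spec_getTermForSyn; infer_instance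

-- ===== CLAIM (what is proved, stated in full; the proofs are below) =====
def Claim_equal_getTermForSyn : Prop := ∀ (syn : String) (terms : List (String × List (String × String))), Dom_getTermForSyn syn terms → Pre_getTermForSyn syn terms → Spec_getTermForSyn syn terms (getTermForSyn syn terms)

-- ===== LEMMAS AND PROOFS =====

-- A's scan, as an Option (none = fell through to "term not found"); the comma test is gone:
-- by split_no_comma below, the comma-free branch is membership in the one-piece split.
def pvScan (syn : String) : List (String × List (String × String)) → Option String
  | [] => none
  | (key, d) :: rest =>
    let syns := (PySem.Dict.mk d).getD "synonyms" ""
    if syns ≠ "" then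
      if ((PySem.Str.split? syns ",").getD []).contains syn then some key
      else pvScan syn rest
    else pvScan syn rest

-- splitting on a separator that occurs nowhere in the string yields the whole string
lemma splitOn_go_no_match (sep : List Char) :
    ∀ (l : List Char) (fuel : Nat) (cur : List Char) (accs : List (List Char)),
      (∀ j, ¬ sep <+: l.drop j) →
      PySem.Chars.splitOn.go sep fuel l cur accs = ((cur.reverse ++ l) :: accs).reverse := by
  intro l
  induction l with
  | nil =>
    intro fuel cur accs _
    cases fuel <;> simp [PySem.Chars.splitOn.go]
  | cons c rest ih =>
    intro fuel cur accs h
    have h0 : ¬ sep.isPrefixOf (c :: rest) = true := by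
      rw [List.isPrefixOf_iff_prefix]; exact h 0
    cases fuel with
    | zero => simp [PySem.Chars.splitOn.go]
    | succ f =>
      rw [PySem.Chars.splitOn.go]
      simp only [h0]
      rw [ih f (c :: cur) accs (fun j => h (j + 1))]
      simp

lemma splitOn_no_match (s sep : List Char)
    (h : PySem.Chars.isIn sep s = false) : PySem.Chars.splitOn s sep = [s] := by
  have hj : ∀ j, ¬ sep <+: s.drop j := by
    intro j hp
    have := (PySem.Chars.exists_prefix_drop_iff_isIn (sub := sep) (s := s)).mp ⟨j, hp⟩
    simp [this] at h
  rw [PySem.Chars.splitOn, splitOn_go_no_match sep s _ [] [] hj]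
  simp

lemma split_no_comma (s : String) (h : PySem.Str.isIn "," s = false) :
    (PySem.Str.split? s ",").getD [] = [s] := by
  have h1 : PySem.Chars.isIn ",".toList s.toList = false := by simpa using h
  have h2 : PySem.Chars.splitOn s.toList [','] = [s.toList] :=
    splitOn_no_match _ _ (by simpa using h1)
  rw [PySem.Str.split?, PySem.Chars.split?, if_neg (by simp)]
  simp [h2]

lemma A_eq_scan (syn : String) (terms : List (String × List (String × String))) :
    getTermForSyn syn terms = (pvScan syn terms).getD "term not found" := by
  induction terms with
  | nil => rfl
  | cons kd rest ih =>
    obtain ⟨key, d⟩ := kd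
    rw [getTermForSyn, pvScan]
    by_cases hne : (PySem.Dict.mk d).getD "synonyms" "" ≠ ""
    · rw [if_pos hne, if_pos hne]
      by_cases hc : PySem.Str.isIn "," ((PySem.Dict.mk d).getD "synonyms" "") = true
      · rw [if_pos hc]
        by_cases hm : syn ∈ (PySem.Str.split? ((PySem.Dict.mk d).getD "synonyms" "") ",").getD []
        · simp [hm]
        · simp [hm, ih]
      · have hc2 : PySem.Str.isIn "," ((PySem.Dict.mk d).getD "synonyms" "") = false := by
          simpa using hc
        rw [if_neg hc, split_no_comma _ hc2]
        by_cases he : (PySem.Dict.mk d).getD "synonyms" "" = syn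
        · simp [he]
        · simp [he, Ne.symm he, ih]
    · rw [if_neg hne, if_neg hne]
      exact ih

lemma setdefault_fold_get (syn key : String) :
    ∀ (pieces : List String) (idx : PySem.Dict String String),
      (pieces.foldl (fun i s => i.setdefault s key) idx).get? syn =
        (idx.get? syn).or (if syn ∈ pieces then some key else none) := by
  intro pieces
  induction pieces with
  | nil => intro idx; simp
  | cons s rest ih =>
    intro idx
    rw [List.foldl_cons, ih]
    by_cases he : syn = s
    · subst he
      rw [PySem.Dict.get?_setdefault_self]
      cases h : idx.get? syn with
      | none => simp [Option.or]
      | some v => simp [Option.or]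
    · rw [PySem.Dict.get?_setdefault_of_ne (hne := he)]
      by_cases hm : syn ∈ rest <;> simp [he, hm]

lemma index_get (syn : String) :
    ∀ (terms : List (String × List (String × String))) (idx : PySem.Dict String String),
      (terms.foldl
        (fun idx kd =>
          let syns := (PySem.Dict.mk kd.2).getD "synonyms" ""
          if syns ≠ "" then
            ((PySem.Str.split? syns ",").getD []).foldl (fun i s => i.setdefault s kd.1) idx
          else idx)
        idx).get? syn = (idx.get? syn).or (pvScan syn terms) := by
  intro terms
  induction terms with
  | nil => intro idx; simp [pvScan]
  | cons kd rest ih =>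
    intro idx
    obtain ⟨key, d⟩ := kd
    rw [List.foldl_cons, pvScan]
    by_cases hne : (PySem.Dict.mk d).getD "synonyms" "" ≠ ""
    · simp only [if_pos hne]
      rw [ih, setdefault_fold_get]
      by_cases hm : syn ∈ (PySem.Str.split? ((PySem.Dict.mk d).getD "synonyms" "") ",").getD []
      · simp [hm]
      · simp [hm]
    · simp only [if_neg hne]
      exact ih idx

-- ===== VERDICT (by name: the statement is the Claim_ definition above) =====
theorem getTermForSyn_spec : Claim_equal_getTermForSyn := by
  intro syn terms _ _
  unfold Spec_getTermForSyn getTermForSyn_alt pvIndex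
  rw [A_eq_scan, PySem.Dict.getD_eq_get?_getD, index_get]
  simp [PySem.Dict.get?_empty]
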